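-- pv_equiv track=rewrite | github.com/mad-lab-fau/tpcp | tpcp/_utils/_general.py | _split_hyper_and_pure_parameters
-- ===== SOURCE A (Python) =====
-- import copy
-- from typing import TYPE_CHECKING, Callable, Dict, List, Optional, Set, Tuple, Union
--
-- def _split_hyper_and_pure_parameters(
--     param_dict: List[Dict], pure_parameters: Optional[List[str]]
-- ) -> List[Tuple[Optional[Dict], Optional[Dict]]]:
--     """Split a list of parameters in hyper parameters and pure parameters.
--
--     For each dictionary in the list, this separates the pure parameters (names provided in input) from all hyper
--     parameters (remaining parameters).
--     If either the none of the pure parameters is present in a parameter dict or all parameters are pure parameters,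
--     the pure or the hyper parameters are `None`.
--
--     Returns
--     -------
--     split_parameters
--         List of tuples `(hyper, pure)` for each of the para dicts in the input list.
--
--     """
--     if pure_parameters is None:
--         return [(c, None) for c in param_dict]
--     split_param_dict = []
--     for c in param_dict:
--         c = copy.copy(c)  # Otherwise we remove elements from the actual parameter list that is passed as input.
--         tmp = {}
--         for k in list(c.keys()):
--             if k in pure_parameters:
--                 tmp[k] = c.pop(k)
--         split_param_dict.append((c or None, tmp or None))
--     return split_param_dict
-- ===== SOURCE B (Python) =====
-- def _split_hyper_and_pure_parameters(param_dict, pure_parameters):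
--     if pure_parameters is None:
--         return [(c, None) for c in param_dict]
--     return [
--         ({k: v for k, v in c.items() if k not in pure_parameters} or None,
--          {k: v for k, v in c.items() if k in pure_parameters} or None)
--         for c in param_dict
--     ]
-- ===== Notes on version B (the rewrite author's own statement) =====
-- stated objective: simpler
-- what changed: Replaced the copy-then-pop mutation loop per dict with two independent filter comprehensions over c.items() building the hyper and pure dicts directly.
import Mathlib
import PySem

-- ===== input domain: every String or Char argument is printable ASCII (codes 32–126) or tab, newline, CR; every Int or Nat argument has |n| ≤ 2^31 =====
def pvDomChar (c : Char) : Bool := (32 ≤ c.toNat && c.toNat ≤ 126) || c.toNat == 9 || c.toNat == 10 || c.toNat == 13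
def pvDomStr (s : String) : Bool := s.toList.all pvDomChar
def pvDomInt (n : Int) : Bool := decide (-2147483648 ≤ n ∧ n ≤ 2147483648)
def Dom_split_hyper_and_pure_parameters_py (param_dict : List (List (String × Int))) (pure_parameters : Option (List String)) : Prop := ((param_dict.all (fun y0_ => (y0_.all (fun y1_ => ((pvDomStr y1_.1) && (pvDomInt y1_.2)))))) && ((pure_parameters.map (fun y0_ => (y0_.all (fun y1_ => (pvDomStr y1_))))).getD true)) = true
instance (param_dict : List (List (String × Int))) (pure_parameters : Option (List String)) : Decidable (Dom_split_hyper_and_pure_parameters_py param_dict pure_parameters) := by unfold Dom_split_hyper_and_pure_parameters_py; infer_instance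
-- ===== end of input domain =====

-- ===== PORT A =====
-- B changes A's per-dict copy+pop mutation loop into two independent filter passes (objective: simpler).
-- Pre_ below restricts to association lists with unique keys, the only ones representing a Python dict.

-- first-match lookup in an association list (Python d[k] on a dict; exact: dict keys are unique)
def pvAGet? : List (String × Int) → String → Option Int
  | [], _ => none
  | p :: rest, k => if p.1 = k then some p.2 else pvAGet? rest k

-- removal of the (unique) entry with key k (Python dict.pop removing the key; exact under Pre_)
def pvAErase : List (String × Int) → String → List (String × Int)
  | [], _ => []
  | p :: rest, k => if p.1 = k then rest else p :: pvAErase rest k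

-- the inner 'for k in list(c.keys()): if k in pure_parameters: tmp[k] = c.pop(k)' loop
def pvPopLoop (pure : List String) : List String → List (String × Int) → List (String × Int) → (List (String × Int)) × (List (String × Int))
  | [], c, tmp => (c, tmp)
  | k :: ks, c, tmp =>
    if pure.contains k then
      match pvAGet? c k with
      | some v => pvPopLoop pure ks (pvAErase c k) (tmp ++ [(k, v)])
      | none => pvPopLoop pure ks c tmp  -- unreachable under Pre_ (unique keys)
    else pvPopLoop pure ks c tmp

def split_hyper_and_pure_parameters_py (param_dict : List (List (String × Int))) (pure_parameters : Option (List String)) : List ((Option (List (String × Int))) × (Option (List (String × Int)))) :=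
  match pure_parameters with
  | none => param_dict.map (fun c => (some c, none))
  | some pure =>
    param_dict.map (fun c =>
      let r := pvPopLoop pure (c.map Prod.fst) c []
      ((if r.1 = [] then none else some r.1), (if r.2 = [] then none else some r.2)))

-- ===== PORT B =====
def split_hyper_and_pure_parameters_py_alt (param_dict : List (List (String × Int))) (pure_parameters : Option (List String)) : List ((Option (List (String × Int))) × (Option (List (String × Int)))) :=
  match pure_parameters with
  | none => param_dict.map (fun c => (some c, none))
  | some pure =>
    param_dict.map (fun c =>
      let hyper := c.filter (fun kv => !pure.contains kv.1)
      let pureD := c.filter (fun kv => pure.contains kv.1)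
      ((if hyper = [] then none else some hyper), (if pureD = [] then none else some pureD)))

-- ===== PRECONDITION & SPEC =====
-- Pre_ excludes association lists with duplicate keys: they represent no Python dict (dict keys are
-- unique), so A's behaviour is defined only on unique-key lists.
def Pre_split_hyper_and_pure_parameters_py (param_dict : List (List (String × Int))) (pure_parameters : Option (List String)) : Prop :=
  ∀ c ∈ param_dict, (c.map Prod.fst).Nodup
instance (param_dict : List (List (String × Int))) (pure_parameters : Option (List String)) : Decidable (Pre_split_hyper_and_pure_parameters_py param_dict pure_parameters) := by unfold Pre_split_hyper_and_pure_parameters_py; infer_instance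
def pvWitness_split_hyper_and_pure_parameters_py : (List (List (String × Int))) × Option (List String) :=
  ([[("a", 1), ("b", 2)], [("c", 3)]], some ["a", "c"])

def Spec_split_hyper_and_pure_parameters_py (param_dict : List (List (String × Int))) (pure_parameters : Option (List String)) (out : List ((Option (List (String × Int))) × (Option (List (String × Int))))) : Prop := out = split_hyper_and_pure_parameters_py_alt param_dict pure_parameters
instance (param_dict : List (List (String × Int))) (pure_parameters : Option (List String)) (out : List ((Option (List (String × Int))) × (Option (List (String × Int))))) : Decidable (Spec_split_hyper_and_pure_parameters_py param_dict pure_parameters out) := by unfold Spec_split_hyper_and_pure_parameters_py; infer_instance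

-- ===== CLAIM (what is proved, stated in full; the proofs are below) =====
def Claim_equal_split_hyper_and_pure_parameters_py : Prop := ∀ (param_dict : List (List (String × Int))) (pure_parameters : Option (List String)), Dom_split_hyper_and_pure_parameters_py param_dict pure_parameters → Pre_split_hyper_and_pure_parameters_py param_dict pure_parameters → Spec_split_hyper_and_pure_parameters_py param_dict pure_parameters (split_hyper_and_pure_parameters_py param_dict pure_parameters)

-- ===== LEMMAS AND PROOFS =====

lemma pvAGet?_append_not_mem (d l : List (String × Int)) (k : String) (h : k ∉ d.map Prod.fst) :
    pvAGet? (d ++ l) k = pvAGet? l k := by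
  induction d with
  | nil => rfl
  | cons p rest ih =>
    simp only [List.map_cons, List.mem_cons, not_or] at h
    simp [pvAGet?, Ne.symm h.1, ih h.2]

lemma pvAErase_append_not_mem (d l : List (String × Int)) (k : String) (h : k ∉ d.map Prod.fst) :
    pvAErase (d ++ l) k = d ++ pvAErase l k := by
  induction d with
  | nil => rfl
  | cons p rest ih =>
    simp only [List.map_cons, List.mem_cons, not_or] at h
    simp [pvAErase, Ne.symm h.1, ih h.2]

lemma pvPopLoop_eq (pure : List String) :
    ∀ (cs d tmp : List (String × Int)), ((d ++ cs).map Prod.fst).Nodup →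
      pvPopLoop pure (cs.map Prod.fst) (d ++ cs) tmp
        = (d ++ cs.filter (fun kv => !pure.contains kv.1),
           tmp ++ cs.filter (fun kv => pure.contains kv.1)) := by
  intro cs
  induction cs with
  | nil => intro d tmp _; simp [pvPopLoop]
  | cons p rest ih =>
    intro d tmp hnd
    obtain ⟨k, v⟩ := p
    rw [show ((d ++ (k, v) :: rest).map Prod.fst) = d.map Prod.fst ++ k :: rest.map Prod.fst by simp] at hnd
    have hkd : k ∉ d.map Prod.fst := fun hk =>
      (List.nodup_append.mp hnd).2.2 k hk k List.mem_cons_self rfl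
    have hnd' : ((d ++ rest).map Prod.fst).Nodup := by
      have h3 := List.nodup_append.mp hnd
      simp only [List.map_append]
      exact List.nodup_append.mpr ⟨h3.1, h3.2.1.of_cons, fun a ha b hb => h3.2.2 a ha b (List.mem_cons_of_mem _ hb)⟩
    simp only [List.map_cons, pvPopLoop]
    by_cases hp : pure.contains k = true
    · have hget : pvAGet? (d ++ (k, v) :: rest) k = some v := by
        rw [pvAGet?_append_not_mem d _ k hkd]; simp [pvAGet?]
      have herase : pvAErase (d ++ (k, v) :: rest) k = d ++ rest := by
        rw [pvAErase_append_not_mem d _ k hkd]; simp [pvAErase]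
      have hk : k ∈ pure := by simpa using hp
      rw [if_pos hp, hget, herase]
      dsimp only
      rw [ih d (tmp ++ [(k, v)]) hnd']
      simp [hk]
    · rw [if_neg hp]
      have hnd2 : (((d ++ [(k, v)]) ++ rest).map Prod.fst).Nodup := by
        simpa using hnd
      have h2 := ih (d ++ [(k, v)]) tmp hnd2
      simp only [List.append_assoc, List.cons_append, List.nil_append] at h2
      have hk : k ∉ pure := by simpa using hp
      rw [h2]
      simp [hk]

-- ===== VERDICT (by name: the statement is the Claim_ definition above) =====
theorem split_hyper_and_pure_parameters_py_spec : Claim_equal_split_hyper_and_pure_parameters_py := by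
  intro param_dict pure_parameters _ hpre
  unfold Spec_split_hyper_and_pure_parameters_py
  unfold split_hyper_and_pure_parameters_py split_hyper_and_pure_parameters_py_alt
  cases pure_parameters with
  | none => rfl
  | some pure =>
    apply List.map_congr_left
    intro c hc
    have h := pvPopLoop_eq pure c [] [] (by simpa using hpre c hc)
    simp only [List.nil_append] at h
    simp only [h]
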